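-- pv_equiv track=rewrite | github.com/petekop/CycloneV6 | round_summary.py | _round_boundaries
-- ===== SOURCE A (Python) =====
-- from typing import Dict, List, Tuple
--
-- def _round_boundaries(total_rounds: int, round_dur: int, rest_dur: int) -> List[Tuple[int, int]]:
--     """Return list of ``(start, end)`` second markers for each round."""
--
--     bounds: List[Tuple[int, int]] = []
--     start = 0
--     for _ in range(total_rounds):
--         end = start + round_dur
--         bounds.append((start, end))
--         start = end + rest_dur
--     return bounds
-- ===== SOURCE B (Python) =====
-- from typing import Dict, List, Tuple
--
-- def _round_boundaries(total_rounds: int, round_dur: int, rest_dur: int) -> List[Tuple[int, int]]: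
--     """Return list of ``(start, end)`` second markers for each round."""
--     p = round_dur + rest_dur
--     return [(i * p, i * p + round_dur) for i in range(total_rounds)]
-- ===== Notes on version B (the rewrite author's own statement) =====
-- stated objective: simpler
-- what changed: Replaces the loop that threads a running 'start' accumulator with a list comprehension computing each round's boundaries independently from its index by the closed form start = i*(round_dur+rest_dur).
import Mathlib
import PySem

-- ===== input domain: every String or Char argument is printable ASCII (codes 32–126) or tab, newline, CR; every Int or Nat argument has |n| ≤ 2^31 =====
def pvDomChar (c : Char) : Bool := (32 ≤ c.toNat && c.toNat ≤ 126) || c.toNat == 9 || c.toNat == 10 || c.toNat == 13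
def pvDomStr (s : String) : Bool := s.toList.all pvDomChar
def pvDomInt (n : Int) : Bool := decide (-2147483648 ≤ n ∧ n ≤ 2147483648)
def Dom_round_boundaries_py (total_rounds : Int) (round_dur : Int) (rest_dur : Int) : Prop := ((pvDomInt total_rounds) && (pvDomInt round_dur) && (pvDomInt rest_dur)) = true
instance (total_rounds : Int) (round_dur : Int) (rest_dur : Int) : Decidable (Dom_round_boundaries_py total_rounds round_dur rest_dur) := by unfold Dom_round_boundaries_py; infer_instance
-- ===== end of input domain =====

-- B replaces A's loop-carried 'start' accumulator by a per-index closed form (simpler decomposition).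

-- ===== PORT A =====
-- loop 'for _ in range(total_rounds)' threading (bounds, start)
def round_boundaries_py (total_rounds : Int) (round_dur : Int) (rest_dur : Int) : List (Int × Int) :=
  let st := (PySem.List.pyRange 0 total_rounds 1).foldl
    (fun (st : List (Int × Int) × Int) _ =>
      let e := st.2 + round_dur
      (st.1 ++ [(st.2, e)], e + rest_dur))
    ([], 0)
  st.1

-- ===== PORT B =====
def round_boundaries_py_alt (total_rounds : Int) (round_dur : Int) (rest_dur : Int) : List (Int × Int) :=
  let p := round_dur + rest_dur
  (PySem.List.pyRange 0 total_rounds 1).map (fun i => (i * p, i * p + round_dur))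

-- ===== PRECONDITION & SPEC =====
def Spec_round_boundaries_py (total_rounds : Int) (round_dur : Int) (rest_dur : Int) (out : List (Int × Int)) : Prop := out = round_boundaries_py_alt total_rounds round_dur rest_dur
instance (total_rounds : Int) (round_dur : Int) (rest_dur : Int) (out : List (Int × Int)) : Decidable (Spec_round_boundaries_py total_rounds round_dur rest_dur out) := by unfold Spec_round_boundaries_py; infer_instance

-- ===== CLAIM =====
def Claim_equal_round_boundaries_py : Prop := ∀ (total_rounds : Int) (round_dur : Int) (rest_dur : Int), Dom_round_boundaries_py total_rounds round_dur rest_dur → Spec_round_boundaries_py total_rounds round_dur rest_dur (round_boundaries_py total_rounds round_dur rest_dur)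

-- ===== LEMMAS AND PROOFS =====

-- The accumulator-threading fold produces exactly the closed-form boundaries offset by s.
theorem rb_fold_closed (round_dur rest_dur : Int) (l : List Int) :
    ∀ (acc : List (Int × Int)) (s : Int),
      (l.foldl (fun (st : List (Int × Int) × Int) _ =>
          let e := st.2 + round_dur
          (st.1 ++ [(st.2, e)], e + rest_dur)) (acc, s)).1
      = acc ++ (List.range l.length).map
          (fun k : Nat => (s + (k : Int) * (round_dur + rest_dur),
                     s + (k : Int) * (round_dur + rest_dur) + round_dur)) := by
  induction l with
  | nil => intro acc s; simp
  | cons x t ih =>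
    intro acc s
    simp only [List.foldl_cons]
    rw [ih]
    rw [List.length_cons, List.range_succ_eq_map, List.map_cons, List.map_map,
        List.append_assoc, List.cons_append, List.nil_append]
    simp only [Nat.cast_zero, zero_mul, add_zero]
    congr 2
    refine List.map_congr_left ?_
    intro k _
    refine Prod.ext ?_ ?_ <;> simp [Function.comp] <;> ring

-- ===== VERDICT =====
theorem round_boundaries_py_spec : Claim_equal_round_boundaries_py := by
  intro n rd rs _
  unfold Spec_round_boundaries_py round_boundaries_py round_boundaries_py_alt
  rw [rb_fold_closed]
  simp [PySem.List.pyRange_one, List.map_map, Function.comp_def]
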